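-- pv_equiv track=rewrite | github.com/Kyotay-12/rbp-evolution-analysis | scripts/analyze_correlations.py | calc_control_family_diversity
-- ===== SOURCE A (Python) =====
-- SPECIES_ORDER = [
--     "Caenorhabditis_elegans",
--     "Drosophila_melanogaster",
--     "Danio_rerio",
--     "Xenopus_tropicalis",
--     "Mus_musculus",
--     "Homo_sapiens",
-- ]
--
-- def calc_control_family_diversity(ctrl_rows, protein_type):
--     """
--     controls_pfam_mapping.tsv columns expected:
--       ensembl_gene_id, gene_symbol, species, protein_type,
--       pfam_families, eurbpdb_family (or pfam_top_family)
--
--     Count distinct Pfam families per species for the given protein_type.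
--     """
--     result = {}
--     for sp in SPECIES_ORDER:
--         sp_rows  = [r for r in ctrl_rows
--                     if r.get("species",       "").strip() == sp
--                     and r.get("protein_type", "").strip() == protein_type]
--         families = set()
--         for r in sp_rows:
--             # Try several possible column names for the family field
--             fam = (r.get("eurbpdb_family") or
--                    r.get("pfam_top_family") or
--                    r.get("pfam_families")   or "").strip()
--             # Use first token if semicolon-separated
--             fam = fam.split(";")[0].strip()
--             if fam and fam not in ("Non-canonical", "unknown", ""):
--                 families.add(fam)
--         result[sp] = {"n_proteins": len(sp_rows), "n_families": len(families)}
--     return result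
-- ===== SOURCE B (Python) =====
-- SPECIES_ORDER = [
--     "Caenorhabditis_elegans",
--     "Drosophila_melanogaster",
--     "Danio_rerio",
--     "Xenopus_tropicalis",
--     "Mus_musculus",
--     "Homo_sapiens",
-- ]
--
-- def calc_control_family_diversity(ctrl_rows, protein_type):
--     # Single grouping pass: pre-initialize one (count, families) slot per species,
--     # then classify each row once instead of rescanning ctrl_rows per species.
--     stats = {sp: (0, set()) for sp in SPECIES_ORDER}
--     for r in ctrl_rows:
--         sp = r.get("species", "").strip()
--         if sp in stats and r.get("protein_type", "").strip() == protein_type: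
--             n, fams = stats[sp]
--             fam = (r.get("eurbpdb_family") or
--                    r.get("pfam_top_family") or
--                    r.get("pfam_families") or "").strip()
--             fam = fam.split(";")[0].strip()
--             if fam and fam not in ("Non-canonical", "unknown"):
--                 fams.add(fam)
--             stats[sp] = (n + 1, fams)
--     return {sp: {"n_proteins": n, "n_families": len(fams)}
--             for sp, (n, fams) in stats.items()}
-- ===== Notes on version B (the rewrite author's own statement) =====
-- stated objective: alternative
-- what changed: Replaces the per-species rescans of ctrl_rows (one full filter pass per SPECIES_ORDER entry) with a single grouping pass over ctrl_rows into a pre-initialized species->(count,family-set) table, then renders the table; measured cost is the same.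
import Mathlib
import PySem

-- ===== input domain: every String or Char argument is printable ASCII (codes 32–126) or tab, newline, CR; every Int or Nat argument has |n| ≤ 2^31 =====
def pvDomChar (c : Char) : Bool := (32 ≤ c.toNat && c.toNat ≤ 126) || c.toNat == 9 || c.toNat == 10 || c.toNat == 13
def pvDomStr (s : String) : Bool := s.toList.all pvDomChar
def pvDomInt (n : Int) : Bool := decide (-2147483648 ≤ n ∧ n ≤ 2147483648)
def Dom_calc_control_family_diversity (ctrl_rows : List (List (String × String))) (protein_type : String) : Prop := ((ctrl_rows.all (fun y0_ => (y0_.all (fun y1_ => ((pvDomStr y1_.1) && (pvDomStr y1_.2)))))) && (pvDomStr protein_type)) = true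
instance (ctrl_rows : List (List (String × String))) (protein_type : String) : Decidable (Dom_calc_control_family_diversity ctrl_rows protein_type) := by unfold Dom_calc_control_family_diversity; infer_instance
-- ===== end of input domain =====

-- B replaces A's six per-species rescans of ctrl_rows with one grouping pass into a
-- pre-initialized species table (objective: alternative single-pass decomposition, same measured cost).

-- shared helpers: the family-field extraction and filter lines common to both Pythons
def SPECIES_ORDER : List String :=
  ["Caenorhabditis_elegans", "Drosophila_melanogaster", "Danio_rerio",
   "Xenopus_tropicalis", "Mus_musculus", "Homo_sapiens"]

-- (r.get("eurbpdb_family") or r.get("pfam_top_family") or r.get("pfam_families") or "")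
-- 'x or y' on an Optional[str]: falsy iff None or ""; getD "" conflates exactly those two falsy cases
def famRaw (r : PySem.Dict String String) : String :=
  let f1 := (r.get? "eurbpdb_family").getD ""
  if f1 != "" then f1 else
  let f2 := (r.get? "pfam_top_family").getD ""
  if f2 != "" then f2 else
  (r.get? "pfam_families").getD ""

-- fam = raw.strip(); fam = fam.split(";")[0].strip()   (split by a nonempty sep is never [], so [0] = headD)
def famOf (r : PySem.Dict String String) : String :=
  -- split? with the nonempty sep ";" is always 'some' of a nonempty list, so getD/headD never take their defaults
  PySem.Str.strip (((PySem.Str.split? (PySem.Str.strip (famRaw r)) ";").getD []).headD "")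

-- if fam and fam not in ("Non-canonical", "unknown", "")
def famOk (fam : String) : Bool :=
  fam != "" && fam != "Non-canonical" && fam != "unknown"

-- ===== PORT A =====
-- r.get("species","").strip() == sp and r.get("protein_type","").strip() == protein_type
def rowMatch (protein_type sp : String) (r : List (String × String)) : Bool :=
  (PySem.Str.strip ((PySem.Dict.mk r).getD "species" "") == sp) &&
  (PySem.Str.strip ((PySem.Dict.mk r).getD "protein_type" "") == protein_type)

-- result[sp] = …: each sp of SPECIES_ORDER is a fresh distinct key, so the dict insertion appends
def calc_control_family_diversity (ctrl_rows : List (List (String × String))) (protein_type : String) : List (String × List (String × Int)) :=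
  SPECIES_ORDER.foldl (fun result sp =>
    let sp_rows := ctrl_rows.filter (fun r => rowMatch protein_type sp r)
    let families : PySem.Set String := sp_rows.foldl (fun fams r =>
        let fam := famOf (PySem.Dict.mk r)
        if famOk fam then PySem.Set.add fams fam else fams) PySem.Set.empty
    result ++ [(sp, [("n_proteins", (sp_rows.length : Int)),
                     ("n_families", (families.length : Int))])]) []

-- ===== PORT B =====
-- loop body of B's single pass (the 'for r in ctrl_rows' body)
def stepB (protein_type : String) (st : PySem.Dict String (Int × PySem.Set String)) (r : List (String × String)) : PySem.Dict String (Int × PySem.Set String) :=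
  let sp := PySem.Str.strip ((PySem.Dict.mk r).getD "species" "")
  if st.contains sp && (PySem.Str.strip ((PySem.Dict.mk r).getD "protein_type" "") == protein_type) then
    let p := st.getD sp (0, PySem.Set.empty)
    let fam := famOf (PySem.Dict.mk r)
    let fams := if famOk fam then PySem.Set.add p.2 fam else p.2
    st.insert sp (p.1 + 1, fams)
  else st

def calc_control_family_diversity_alt (ctrl_rows : List (List (String × String))) (protein_type : String) : List (String × List (String × Int)) :=
  -- stats = {sp: (0, set()) for sp in SPECIES_ORDER}
  let init : PySem.Dict String (Int × PySem.Set String) :=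
    PySem.Dict.mk (SPECIES_ORDER.map (fun sp => (sp, ((0 : Int), (PySem.Set.empty : PySem.Set String)))))
  let stats := ctrl_rows.foldl (stepB protein_type) init
  -- final dict comprehension over stats.items(): fresh distinct keys, insertion order = items order
  stats.items.map (fun e => (e.1, [("n_proteins", e.2.1), ("n_families", ((e.2.2 : List String).length : Int))]))

-- ===== PRECONDITION & SPEC =====
def Spec_calc_control_family_diversity (ctrl_rows : List (List (String × String))) (protein_type : String) (out : List (String × List (String × Int))) : Prop := out = calc_control_family_diversity_alt ctrl_rows protein_type
instance (ctrl_rows : List (List (String × String))) (protein_type : String) (out : List (String × List (String × Int))) : Decidable (Spec_calc_control_family_diversity ctrl_rows protein_type out) := by unfold Spec_calc_control_family_diversity; infer_instance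

-- ===== CLAIM (what is proved, stated in full; the proofs are below) =====
def Claim_equal_calc_control_family_diversity : Prop := ∀ (ctrl_rows : List (List (String × String))) (protein_type : String), Dom_calc_control_family_diversity ctrl_rows protein_type → Spec_calc_control_family_diversity ctrl_rows protein_type (calc_control_family_diversity ctrl_rows protein_type)

-- ===== LEMMAS AND PROOFS =====

-- the per-row update of one species' (count, families) slot
def bump (r : List (String × String)) (v : Int × PySem.Set String) : Int × PySem.Set String :=
  (v.1 + 1, if famOk (famOf (PySem.Dict.mk r)) then PySem.Set.add v.2 (famOf (PySem.Dict.mk r)) else v.2)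

-- B's step acts entrywise on the table (keys Nodup): each entry sp is bumped iff the row matches sp
theorem stepB_items (pt : String) (l : List (String × (Int × PySem.Set String))) (r : List (String × String))
    (hnd : (l.map Prod.fst).Nodup) :
    stepB pt (PySem.Dict.mk l) r
      = PySem.Dict.mk (l.map (fun e => (e.1, if rowMatch pt e.1 r then bump r e.2 else e.2))) := by
  unfold stepB rowMatch
  by_cases hpt : (PySem.Str.strip ((PySem.Dict.mk r).getD "protein_type" "") == pt) = true
  · by_cases hc : (PySem.Dict.mk l).contains (PySem.Str.strip ((PySem.Dict.mk r).getD "species" "")) = true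
    · rw [if_pos (by simp [hpt, hc])]
      apply PySem.Dict.ext
      rw [PySem.Dict.items_insert_of_contains _ _ hc]
      have hitems : (PySem.Dict.mk l).items = l := rfl
      rw [hitems]
      apply List.map_congr_left
      intro e he
      by_cases hsp : e.1 = PySem.Str.strip ((PySem.Dict.mk r).getD "species" "")
      · have hkeys : (PySem.Dict.mk l).keys.Nodup := hnd
        have hget : (PySem.Dict.mk l).getD e.1 ((0 : Int), (PySem.Set.empty : PySem.Set String)) = e.2 :=
          PySem.Dict.getD_of_mem_items (d := PySem.Dict.mk l) (k := e.1) (v := e.2)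
            (by simpa using he) hkeys ((0 : Int), (PySem.Set.empty : PySem.Set String))
        rw [← hsp] at *
        simp only [beq_self_eq_true, if_true, hget, bump, hpt, Bool.and_true]
      · have h1 : (e.1 == PySem.Str.strip ((PySem.Dict.mk r).getD "species" "")) = false := by
          simp [hsp]
        have h2 : (PySem.Str.strip ((PySem.Dict.mk r).getD "species" "") == e.1) = false := by
          simp only [beq_eq_false_iff_ne] at h1 ⊢
          exact Ne.symm h1
        simp [h1, h2]
    · rw [if_neg (by simp [hc])]
      refine congrArg PySem.Dict.mk (((List.map_congr_left ?_).trans (List.map_id' l)).symm)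
      intro e he
      have hne : (PySem.Str.strip ((PySem.Dict.mk r).getD "species" "") == e.1) = false := by
        by_contra h
        have heq : PySem.Str.strip ((PySem.Dict.mk r).getD "species" "") = e.1 := by simpa using h
        apply absurd hc
        simp only [heq, not_not]
        rw [PySem.Dict.contains_iff_mem_keys]
        exact List.mem_map_of_mem he
      simp [hne]
  · rw [if_neg (by simp [hpt])]
    refine congrArg PySem.Dict.mk (((List.map_congr_left ?_).trans (List.map_id' l)).symm)
    intro e he
    simp [hpt]

-- the whole single pass acts entrywise: entry sp ends at the fold of 'bump when matching' over all rows
theorem foldB_items (pt : String) (rows : List (List (String × String)))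
    (l : List (String × (Int × PySem.Set String))) (hnd : (l.map Prod.fst).Nodup) :
    rows.foldl (stepB pt) (PySem.Dict.mk l)
      = PySem.Dict.mk (l.map (fun e =>
          (e.1, rows.foldl (fun v r => if rowMatch pt e.1 r then bump r v else v) e.2))) := by
  induction rows generalizing l with
  | nil =>
    refine congrArg PySem.Dict.mk (((List.map_congr_left ?_).trans (List.map_id' l)).symm)
    intro e he; rfl
  | cons r rows ih =>
    rw [List.foldl_cons, stepB_items pt l r hnd,
        ih _ (by simpa [List.map_map, Function.comp_def] using hnd)]
    simp [List.map_map, Function.comp_def]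

-- the matching-guarded bump from (0, ∅) equals A's per-species pair (row count, families fold)
theorem perSpecies_eq (pt sp : String) (rows : List (List (String × String))) :
    rows.foldl (fun v r => if rowMatch pt sp r then bump r v else v) ((0 : Int), (PySem.Set.empty : PySem.Set String))
      = (((rows.filter (fun r => rowMatch pt sp r)).length : Int),
         (rows.filter (fun r => rowMatch pt sp r)).foldl (fun fams r =>
             if famOk (famOf (PySem.Dict.mk r)) then PySem.Set.add fams (famOf (PySem.Dict.mk r)) else fams)
           PySem.Set.empty) := by
  rw [PySem.List.foldl_if_eq_foldl_filter]
  have hco := PySem.List.foldl_congr_mem (rows.filter (fun r => rowMatch pt sp r))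
      (fun v r => bump r v)
      (fun s e => ((fun (n : Int) (_ : List (String × String)) => n + 1) s.1 e,
          (fun (fams : PySem.Set String) (r : List (String × String)) =>
            if famOk (famOf (PySem.Dict.mk r)) then PySem.Set.add fams (famOf (PySem.Dict.mk r)) else fams) s.2 e))
      (((0 : Int), (PySem.Set.empty : PySem.Set String)))
      (fun acc x _ => rfl)
  rw [hco, PySem.List.foldl_prod_mk
        (f := fun (n : Int) (_ : List (String × String)) => n + 1)
        (g := fun (fams : PySem.Set String) (r : List (String × String)) =>
            if famOk (famOf (PySem.Dict.mk r)) then PySem.Set.add fams (famOf (PySem.Dict.mk r)) else fams)]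
  have hcount : ∀ (m : List (List (String × String))) (a : Int),
      m.foldl (fun (n : Int) (_ : List (String × String)) => n + 1) a = a + m.length := by
    intro m
    induction m with
    | nil => simp
    | cons x xs ih => intro a; simp [ih]; omega
  simp [hcount]

-- ===== VERDICT (by name: the statement is the Claim_ definition above) =====
theorem calc_control_family_diversity_spec : Claim_equal_calc_control_family_diversity := by
  intro ctrl_rows protein_type _
  unfold Spec_calc_control_family_diversity
  unfold calc_control_family_diversity calc_control_family_diversity_alt
  dsimp only
  rw [PySem.List.foldl_append_singleton_eq_map]
  have hnd : ((SPECIES_ORDER.map (fun sp => (sp, ((0 : Int), (PySem.Set.empty : PySem.Set String))))).map Prod.fst).Nodup := by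
    simp only [List.map_map, Function.comp_def]
    decide
  rw [foldB_items protein_type ctrl_rows _ hnd]
  simp only [List.map_map, Function.comp_def, List.nil_append]
  apply List.map_congr_left
  intro sp _
  rw [perSpecies_eq]
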